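-- pv_equiv track=rewrite | github.com/mindstxrm/Geopolitiko | app/risk_engine.py | _topics_to_sectors
-- ===== SOURCE A (Python) =====
-- SECTOR_ENERGY = {"Climate & Energy", "Energy", "Oil", "Gas", "OPEC", "Middle East"}
--
-- SECTOR_TECH = {"Technology", "Semiconductors", "Cyber", "US-China"}
--
-- SECTOR_MARITIME = {"Maritime", "Shipping", "Suez", "Strait", "South China Sea", "Red Sea"}
--
-- SECTOR_SUPPLY_CHAIN = {"Trade & Economy", "Supply Chain", "Trade", "Export", "Import"}
--
-- def _topics_to_sectors(topics: list, domains: list) -> dict: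
--     """Return sector exposure counts from topics and impact_domains."""
--     combined = set(topics or []) | set(domains or [])
--     return {
--         "energy": sum(1 for x in combined if any(s in str(x) for s in SECTOR_ENERGY)),
--         "tech": sum(1 for x in combined if any(s in str(x) for s in SECTOR_TECH)),
--         "maritime": sum(1 for x in combined if any(s in str(x) for s in SECTOR_MARITIME)),
--         "supply_chain": sum(1 for x in combined if any(s in str(x) for s in SECTOR_SUPPLY_CHAIN)),
--     }
-- ===== SOURCE B (Python) =====
-- SECTOR_ENERGY = {"Climate & Energy", "Energy", "Oil", "Gas", "OPEC", "Middle East"}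
-- SECTOR_TECH = {"Technology", "Semiconductors", "Cyber", "US-China"}
-- SECTOR_MARITIME = {"Maritime", "Shipping", "Suez", "Strait", "South China Sea", "Red Sea"}
-- SECTOR_SUPPLY_CHAIN = {"Trade & Economy", "Supply Chain", "Trade", "Export", "Import"}
--
-- def _count(group, combined):
--     """Cardinality of the union over keywords of that keyword's match set."""
--     matched = set()
--     for kw in group:
--         for x in combined:
--             if kw in str(x):
--                 matched.add(x)
--     return len(matched)
--
-- def _topics_to_sectors(topics: list, domains: list) -> dict:
--     """Keyword-outer scan: per sector, union the per-keyword match sets and count."""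
--     combined = set(topics or []) | set(domains or [])
--     return {
--         "energy": _count(SECTOR_ENERGY, combined),
--         "tech": _count(SECTOR_TECH, combined),
--         "maritime": _count(SECTOR_MARITIME, combined),
--         "supply_chain": _count(SECTOR_SUPPLY_CHAIN, combined),
--     }
-- ===== Notes on version B (the rewrite author's own statement) =====
-- stated objective: alternative
-- what changed: Inverts the loop nesting: instead of scanning the combined set per sector and testing any(keyword in element), B loops over each sector's keywords, unions the per-keyword match sets of elements into a set, and returns its cardinality (correct since combined is duplicate-free, so |union of match sets| equals the count of elements matching any keyword).
import Mathlib
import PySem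

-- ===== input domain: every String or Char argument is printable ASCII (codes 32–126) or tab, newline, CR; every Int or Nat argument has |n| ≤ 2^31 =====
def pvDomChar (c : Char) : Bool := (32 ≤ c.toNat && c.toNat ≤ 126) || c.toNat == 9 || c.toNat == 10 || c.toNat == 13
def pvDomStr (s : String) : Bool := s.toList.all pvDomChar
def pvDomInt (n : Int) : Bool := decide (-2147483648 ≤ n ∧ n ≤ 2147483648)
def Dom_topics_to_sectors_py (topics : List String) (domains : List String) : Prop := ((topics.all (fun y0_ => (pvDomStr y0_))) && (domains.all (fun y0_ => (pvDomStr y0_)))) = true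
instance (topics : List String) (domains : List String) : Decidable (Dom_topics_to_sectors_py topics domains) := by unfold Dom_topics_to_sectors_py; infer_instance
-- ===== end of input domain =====

-- B inverts A's loop nesting: per sector it loops over the keywords, unions the per-keyword match sets into a set, and returns its cardinality (alternative decomposition, same cost).

-- shared module constants (the four sector keyword sets)
def sectorEnergy : List String := ["Climate & Energy", "Energy", "Oil", "Gas", "OPEC", "Middle East"]
def sectorTech : List String := ["Technology", "Semiconductors", "Cyber", "US-China"]
def sectorMaritime : List String := ["Maritime", "Shipping", "Suez", "Strait", "South China Sea", "Red Sea"]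
def sectorSupplyChain : List String := ["Trade & Economy", "Supply Chain", "Trade", "Export", "Import"]

-- ===== PORT A =====
-- any(s in str(x) for s in group)
def sectorHit (group : List String) (x : String) : Bool := group.any (fun s => PySem.Str.isIn s x)

-- dict comprehension: four separate 0/1 sums over the combined set, element-outer with any()
def topics_to_sectors_py (topics : List String) (domains : List String) : List (String × Int) :=
  let combined := PySem.Set.union (PySem.Set.ofList topics) domains
  [("energy", (combined.countP (sectorHit sectorEnergy) : Int)),
   ("tech", (combined.countP (sectorHit sectorTech) : Int)),
   ("maritime", (combined.countP (sectorHit sectorMaritime) : Int)),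
   ("supply_chain", (combined.countP (sectorHit sectorSupplyChain) : Int))]

-- ===== PORT B =====
-- _count: keyword-outer double loop accumulating the matched elements into a set, then len
def countMatched (group : List String) (combined : List String) : Int :=
  PySem.Set.len
    (group.foldl (fun matched kw =>
      combined.foldl (fun m x => if PySem.Str.isIn kw x then PySem.Set.add m x else m) matched)
      PySem.Set.empty)

def topics_to_sectors_py_alt (topics : List String) (domains : List String) : List (String × Int) :=
  let combined := PySem.Set.union (PySem.Set.ofList topics) domains
  [("energy", countMatched sectorEnergy combined),
   ("tech", countMatched sectorTech combined),
   ("maritime", countMatched sectorMaritime combined),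
   ("supply_chain", countMatched sectorSupplyChain combined)]

-- ===== PRECONDITION & SPEC =====
def Spec_topics_to_sectors_py (topics : List String) (domains : List String) (out : List (String × Int)) : Prop := out = topics_to_sectors_py_alt topics domains
instance (topics : List String) (domains : List String) (out : List (String × Int)) : Decidable (Spec_topics_to_sectors_py topics domains out) := by unfold Spec_topics_to_sectors_py; infer_instance

-- ===== CLAIM =====
def Claim_equal_topics_to_sectors_py : Prop := ∀ (topics : List String) (domains : List String), Dom_topics_to_sectors_py topics domains → Spec_topics_to_sectors_py topics domains (topics_to_sectors_py topics domains)

-- ===== LEMMAS AND PROOFS =====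

-- membership in the inner (conditional-add) fold
theorem mem_inner_fold (combined : List String) (kw : String) (m : List String) (y : String) :
    y ∈ combined.foldl (fun m x => if PySem.Str.isIn kw x then PySem.Set.add m x else m) m ↔
      y ∈ m ∨ (y ∈ combined ∧ PySem.Str.isIn kw y) := by
  induction combined generalizing m with
  | nil => simp
  | cons x xs ih =>
    simp only [List.foldl_cons, ih]
    split_ifs with h
    · simp only [PySem.Set.mem_add, List.mem_cons]
      constructor
      · rintro (⟨hy | rfl⟩ | ⟨hy, hk⟩)
        · exact Or.inl hy
        · exact Or.inr ⟨Or.inl rfl, h⟩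
        · exact Or.inr ⟨Or.inr hy, hk⟩
      · rintro (hy | ⟨(rfl | hy), hk⟩)
        · exact Or.inl (Or.inl hy)
        · exact Or.inl (Or.inr rfl)
        · exact Or.inr ⟨hy, hk⟩
    · simp only [List.mem_cons]
      constructor
      · rintro (hy | ⟨hy, hk⟩)
        · exact Or.inl hy
        · exact Or.inr ⟨Or.inr hy, hk⟩
      · rintro (hy | ⟨(rfl | hy), hk⟩)
        · exact Or.inl hy
        · exact absurd hk (by simpa using h)
        · exact Or.inr ⟨hy, hk⟩

theorem nodup_inner_fold (combined : List String) (kw : String) (m : List String) (hm : m.Nodup) :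
    (combined.foldl (fun m x => if PySem.Str.isIn kw x then PySem.Set.add m x else m) m).Nodup := by
  induction combined generalizing m with
  | nil => exact hm
  | cons x xs ih =>
    simp only [List.foldl_cons]
    split_ifs with h
    · exact ih _ (PySem.Set.nodup_add _ _ hm)
    · exact ih _ hm

theorem mem_outer_fold (group combined : List String) (m : List String) (y : String) :
    y ∈ group.foldl (fun matched kw =>
        combined.foldl (fun m x => if PySem.Str.isIn kw x then PySem.Set.add m x else m) matched) m ↔
      y ∈ m ∨ (y ∈ combined ∧ sectorHit group y) := by
  induction group generalizing m with
  | nil => simp [sectorHit]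
  | cons kw rest ih =>
    have hs : sectorHit (kw :: rest) y = (PySem.Str.isIn kw y || sectorHit rest y) := by
      simp [sectorHit]
    simp only [List.foldl_cons, ih, mem_inner_fold, hs, Bool.or_eq_true]
    tauto

theorem nodup_outer_fold (group combined : List String) (m : List String) (hm : m.Nodup) :
    (group.foldl (fun matched kw =>
        combined.foldl (fun m x => if PySem.Str.isIn kw x then PySem.Set.add m x else m) matched) m).Nodup := by
  induction group generalizing m with
  | nil => exact hm
  | cons kw rest ih => exact ih _ (nodup_inner_fold _ _ _ hm)

-- B's keyword-outer set accumulation counts exactly what A's element-outer any() counts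
theorem countMatched_eq_countP (group combined : List String) (hc : combined.Nodup) :
    countMatched group combined = (combined.countP (sectorHit group) : Int) := by
  have hperm : (group.foldl (fun matched kw =>
      combined.foldl (fun m x => if PySem.Str.isIn kw x then PySem.Set.add m x else m) matched)
      PySem.Set.empty).Perm (combined.filter (sectorHit group)) :=
    (List.perm_ext_iff_of_nodup (nodup_outer_fold group combined PySem.Set.empty List.nodup_nil)
      (hc.filter _)).mpr (by
        intro y
        constructor
        · intro h
          rcases (mem_outer_fold group combined PySem.Set.empty y).mp h with h | h
          · exact absurd h (by simp [PySem.Set.empty])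
          · exact List.mem_filter.mpr ⟨h.1, h.2⟩
        · intro h
          rcases List.mem_filter.mp h with ⟨h1, h2⟩
          exact (mem_outer_fold group combined PySem.Set.empty y).mpr (Or.inr ⟨h1, h2⟩))
  unfold countMatched
  simp only [PySem.Set.len, hperm.length_eq, List.countP_eq_length_filter]

-- ===== VERDICT =====
theorem topics_to_sectors_py_spec : Claim_equal_topics_to_sectors_py := by
  intro topics domains _
  unfold Spec_topics_to_sectors_py topics_to_sectors_py topics_to_sectors_py_alt
  have hc : (PySem.Set.union (PySem.Set.ofList topics) domains).Nodup :=
    PySem.Set.nodup_union _ _ (PySem.Set.nodup_ofList _)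
  simp [countMatched_eq_countP _ _ hc]
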